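-- pv_equiv track=rewrite | github.com/casseyprovenzano461861-del/clawai | src/shared/backend/core/intelligent_tool_selector.py | _rule_matches_conditions
-- ===== SOURCE A (Python) =====
-- from typing import Dict, List, Any, Optional, Tuple
--
-- def _rule_matches_conditions(
--
--     conditions: Dict[str, Any],
--     tool_info: Dict[str, Any],
--     context: Dict[str, Any]
-- ) -> bool:
--     """检查规则条件是否匹配"""
--     for key, expected_value in conditions.items():
--         # 检查上下文
--         if key in context:
--             if context[key] != expected_value:
--                 return False
--         # 检查工具信息
--         elif key in tool_info:
--             if tool_info[key] != expected_value:
--                 return False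
--         else:
--             return False
--
--     return True
-- ===== SOURCE B (Python) =====
-- def _rule_matches_conditions(conditions, tool_info, context):
--     """Reverse traversal: discharge the required conditions by scanning context
--     then tool_info, popping each satisfied one; succeed iff none remain."""
--     remaining = dict(conditions)
--     for key, value in context.items():
--         if key in remaining and remaining.pop(key) != value:
--             return False
--     for key, value in tool_info.items():
--         if key in remaining and remaining.pop(key) != value:
--             return False
--     return not remaining
-- ===== Notes on version B (the rewrite author's own statement) =====
-- stated objective: alternative
-- what changed: Reverses the traversal: instead of A's loop over conditions with a two-level context/tool_info branch, B copies conditions into a 'remaining' dict, scans context then tool_info popping each condition they discharge (failing on a value mismatch), and succeeds iff nothing remains.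
import Mathlib
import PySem

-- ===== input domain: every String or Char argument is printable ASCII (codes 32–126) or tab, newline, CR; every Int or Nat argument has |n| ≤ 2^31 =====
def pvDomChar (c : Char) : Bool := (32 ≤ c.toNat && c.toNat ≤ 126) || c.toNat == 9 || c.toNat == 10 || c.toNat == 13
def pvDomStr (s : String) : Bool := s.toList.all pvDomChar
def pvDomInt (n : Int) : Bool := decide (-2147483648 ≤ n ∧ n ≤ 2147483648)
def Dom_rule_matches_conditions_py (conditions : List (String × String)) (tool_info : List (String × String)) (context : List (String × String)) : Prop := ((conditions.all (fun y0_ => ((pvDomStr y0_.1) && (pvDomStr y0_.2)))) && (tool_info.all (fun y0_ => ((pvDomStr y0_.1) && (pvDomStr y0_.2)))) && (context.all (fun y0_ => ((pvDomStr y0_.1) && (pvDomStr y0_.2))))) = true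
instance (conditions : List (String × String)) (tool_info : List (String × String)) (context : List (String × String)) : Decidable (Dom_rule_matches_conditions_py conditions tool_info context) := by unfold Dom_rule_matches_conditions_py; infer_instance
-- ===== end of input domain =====

-- B reverses the traversal: instead of A's loop over conditions with a two-level
-- context/tool_info branch, B copies conditions into a 'remaining' dict, scans context
-- then tool_info popping each condition they discharge (failing on a mismatch), and
-- succeeds iff nothing remains; objective: alternative (same cost, different algorithm).

-- ===== PORT A =====
-- A's for-loop over conditions.items() with its branch chain and early returns
def pvGoA (tool_info context : List (String × String)) : List (String × String) → Bool
  | [] => true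
  | (key, expected) :: rest =>
    match context.lookup key with          -- 'if key in context: if context[key] != expected: return False'
    | some v => if v ≠ expected then false else pvGoA tool_info context rest
    | none =>
      match tool_info.lookup key with      -- 'elif key in tool_info: …'
      | some v => if v ≠ expected then false else pvGoA tool_info context rest
      | none => false                      -- 'else: return False'

def rule_matches_conditions_py (conditions : List (String × String)) (tool_info : List (String × String)) (context : List (String × String)) : Bool :=
  pvGoA tool_info context conditions

-- ===== PORT B =====
-- one 'for key, value in src.items(): if key in remaining and remaining.pop(key) != value: return False'
-- loop; none = the early 'return False', some d = the surviving remaining dict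
def pvScanB (remaining : PySem.Dict String String) : List (String × String) → Option (PySem.Dict String String)
  | [] => some remaining
  | (key, value) :: rest =>
    match remaining.get? key with                -- 'key in remaining' + 'remaining.pop(key)'
    | some w => if w ≠ value then none else pvScanB (remaining.erase key) rest
    | none => pvScanB remaining rest

def rule_matches_conditions_py_alt (conditions : List (String × String)) (tool_info : List (String × String)) (context : List (String × String)) : Bool :=
  let remaining := PySem.Dict.ofList conditions            -- 'remaining = dict(conditions)'
  match pvScanB remaining context with                     -- first loop, over context.items()
  | none => false
  | some r1 =>
    match pvScanB r1 tool_info with                        -- second loop, over tool_info.items()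
    | none => false
    | some r2 => r2.size == 0                              -- 'return not remaining'

-- ===== PRECONDITION & SPEC =====
-- Pre_ excludes association lists whose conditions component repeats a key: no Python dict
-- is represented by such a list (a dict's keys are unique), and on it the dict convention's
-- value for the key is ambiguous (B's dict copy keeps the last binding, A's itemwise loop
-- checks every binding).
def Pre_rule_matches_conditions_py (conditions : List (String × String)) (tool_info : List (String × String)) (context : List (String × String)) : Prop :=
  (conditions.map Prod.fst).Nodup
instance (conditions : List (String × String)) (tool_info : List (String × String)) (context : List (String × String)) : Decidable (Pre_rule_matches_conditions_py conditions tool_info context) := by unfold Pre_rule_matches_conditions_py; infer_instance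

def pvWitness_rule_matches_conditions_py : (List (String × String)) × (List (String × String)) × (List (String × String)) :=
  ([("mode", "fast"), ("lang", "py")], [("lang", "py")], [("mode", "fast")])

def Spec_rule_matches_conditions_py (conditions : List (String × String)) (tool_info : List (String × String)) (context : List (String × String)) (out : Bool) : Prop := out = rule_matches_conditions_py_alt conditions tool_info context
instance (conditions : List (String × String)) (tool_info : List (String × String)) (context : List (String × String)) (out : Bool) : Decidable (Spec_rule_matches_conditions_py conditions tool_info context out) := by unfold Spec_rule_matches_conditions_py; infer_instance

-- ===== CLAIM (what is proved, stated in full; the proofs are below) =====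
def Claim_equal_rule_matches_conditions_py : Prop := ∀ (conditions : List (String × String)) (tool_info : List (String × String)) (context : List (String × String)), Dom_rule_matches_conditions_py conditions tool_info context → Pre_rule_matches_conditions_py conditions tool_info context → Spec_rule_matches_conditions_py conditions tool_info context (rule_matches_conditions_py conditions tool_info context)

-- ===== LEMMAS AND PROOFS =====

-- A's loop is the conjunction of 'effective lookup (context first) equals the expected value'
theorem pvGoA_eq (conditions tool_info context : List (String × String)) :
    pvGoA tool_info context conditions
      = conditions.all (fun p => (context ++ tool_info).lookup p.1 == some p.2) := by
  induction conditions with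
  | nil => rfl
  | cons p rest ih =>
    cases p with
    | mk key expected =>
      simp only [List.all_cons, pvGoA]
      cases hc : context.lookup key with
      | some v =>
        by_cases hv : v = expected
        · simp [hv, hc, ih, List.lookup_append]
        · simp [hv, hc, List.lookup_append]
      | none =>
        cases ht : tool_info.lookup key with
        | some v =>
          by_cases hv : v = expected
          · simp [hv, hc, ht, ih, List.lookup_append]
          · simp [hv, hc, ht, List.lookup_append]
        | none => simp [hc, ht, List.lookup_append]

-- the per-entry test a scan over xs imposes on a remaining entry p
def pvOk (xs : List (String × String)) (p : String × String) : Bool :=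
  match xs.lookup p.1 with
  | some w => w == p.2
  | none => true

-- characterisation of one scan loop on a duplicate-key-free remaining dict:
-- it fails iff some remaining entry is contradicted by xs, and the entries xs
-- says nothing about survive, in order
theorem pvScanB_eq (xs : List (String × String)) (L : List (String × String))
    (hnd : (L.map Prod.fst).Nodup) :
    pvScanB ⟨L⟩ xs
      = if L.all (pvOk xs)
        then some ⟨L.filter (fun p => (xs.lookup p.1).isNone)⟩
        else none := by
  induction xs generalizing L with
  | nil =>
    have h1 : L.all (pvOk []) = true := by
      simp [List.all_eq_true, pvOk, List.lookup]
    rw [pvScanB, h1]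
    simp [List.lookup]
  | cons q rest ih =>
    cases q with
    | mk key value =>
      simp only [pvScanB]
      cases hf : (PySem.Dict.mk L).get? key with
      | none =>
        -- key is not a key of L: the scanned (key, value) entry is a no-op
        have hk : ∀ p ∈ L, p.1 ≠ key := by
          intro p hp hkey
          have hfind : L.find? (fun p => p.1 == key) = none := by
            simpa [PySem.Dict.get?, Option.map_eq_none_iff] using hf
          have := List.find?_eq_none.mp hfind p hp
          simp [hkey] at this
        rw [ih L hnd]
        have hall : L.all (pvOk ((key, value) :: rest)) = L.all (pvOk rest) := by
          apply Bool.coe_iff_coe.mp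
          simp only [List.all_eq_true]
          refine ⟨fun h p hp => ?_, fun h p hp => ?_⟩ <;>
            simpa [pvOk, List.lookup, beq_eq_false_iff_ne.mpr (hk p hp)] using h p hp
        have hfil : L.filter (fun p => (((key, value) :: rest).lookup p.1).isNone)
            = L.filter (fun p => (rest.lookup p.1).isNone) := by
          apply List.filter_congr
          intro p hp
          simp [List.lookup, beq_eq_false_iff_ne.mpr (hk p hp)]
        rw [hall, hfil]
      | some w =>
        -- key is a key of L with value w; by Nodup, (key, w) is its only entry
        obtain ⟨p₀, hfind, hw⟩ : ∃ p₀, L.find? (fun p => p.1 == key) = some p₀ ∧ p₀.2 = w := by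
          simp only [PySem.Dict.get?, Option.map_eq_some_iff] at hf
          obtain ⟨p₀, h1, h2⟩ := hf
          exact ⟨p₀, h1, h2⟩
        have hp₀mem : p₀ ∈ L := List.mem_of_find?_eq_some hfind
        have hp₀key : p₀.1 = key := by
          have := List.find?_some hfind
          simpa using this
        have hp₀ : p₀ = (key, w) := by cases p₀; simp_all
        subst hp₀
        have huniq : ∀ p ∈ L, p.1 = key → p = (key, w) := by
          intro p hp h
          exact List.inj_on_of_nodup_map hnd hp hp₀mem (by simpa using h)
        by_cases hv : w = value
        · -- matched: the entry is popped, the scan continues on the erased dict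
          subst hv
          simp only [ne_eq, not_true_eq_false, ite_false]
          have hnd' : ((L.filter (fun p => !(p.1 == key))).map Prod.fst).Nodup :=
            List.Nodup.sublist (List.Sublist.map Prod.fst List.filter_sublist) hnd
          have herase : (PySem.Dict.mk L).erase key = ⟨L.filter (fun p => !(p.1 == key))⟩ := rfl
          rw [herase, ih _ hnd']
          have hall : L.all (pvOk ((key, w) :: rest))
              = (L.filter (fun p => !(p.1 == key))).all (pvOk rest) := by
            apply Bool.coe_iff_coe.mp
            simp only [List.all_eq_true, List.mem_filter]
            constructor
            · intro h p ⟨hp, hpk⟩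
              have hne : p.1 ≠ key := by simpa using hpk
              have := h p hp
              simpa [pvOk, List.lookup, beq_eq_false_iff_ne.mpr hne] using this
            · intro h p hp
              by_cases hpk : p.1 = key
              · have := huniq p hp hpk
                subst this
                simp [pvOk, List.lookup]
              · have := h p ⟨hp, by simpa using hpk⟩
                simpa [pvOk, List.lookup, beq_eq_false_iff_ne.mpr hpk] using this
          have hfil : L.filter (fun p => (((key, w) :: rest).lookup p.1).isNone)
              = (L.filter (fun p => !(p.1 == key))).filter
                  (fun p => (rest.lookup p.1).isNone) := by
            rw [List.filter_filter]
            apply List.filter_congr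
            intro p hp
            by_cases hpk : p.1 = key
            · simp [List.lookup, hpk]
            · simp [List.lookup, beq_eq_false_iff_ne.mpr hpk]
          rw [hall, hfil]
        · -- mismatch: the scan returns False, and indeed (key, w) is contradicted
          have hvne : w ≠ value := hv
          simp only [ne_eq, hvne, not_false_eq_true, if_pos]
          have : L.all (pvOk ((key, value) :: rest)) = false := by
            refine List.all_eq_false.mpr ⟨(key, w), hp₀mem, ?_⟩
            simp [pvOk, List.lookup, Ne.symm hvne]
          rw [this]
          simp

-- dict(conditions) is conditions itself when its keys are distinct
theorem pvOfList_eq (conditions : List (String × String))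
    (hnd : (conditions.map Prod.fst).Nodup) :
    PySem.Dict.ofList conditions = PySem.Dict.mk conditions := by
  apply PySem.Dict.ext
  have h := PySem.Dict.items_foldl_insert_fresh (l := conditions)
      (d := (PySem.Dict.empty : PySem.Dict String String))
      (k := Prod.fst) (v := Prod.snd)
      (by intro a _; simp [PySem.Dict.contains_empty]) (by simpa using hnd)
  simpa [PySem.Dict.ofList, PySem.Dict.update, PySem.Dict.empty] using h

-- ===== VERDICT (by name: the statement is the Claim_ definition above) =====
theorem rule_matches_conditions_py_spec : Claim_equal_rule_matches_conditions_py := by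
  intro conds ti ctx _ hpre
  unfold Spec_rule_matches_conditions_py rule_matches_conditions_py rule_matches_conditions_py_alt
  rw [pvGoA_eq]
  simp only [pvOfList_eq conds hpre]
  by_cases h1 : conds.all (pvOk ctx) = true
  · simp only [pvScanB_eq ctx conds hpre, if_pos h1]
    have hnd1 : ((conds.filter (fun p => (ctx.lookup p.1).isNone)).map Prod.fst).Nodup :=
      List.Nodup.sublist (List.Sublist.map Prod.fst List.filter_sublist) hpre
    by_cases h2 : (conds.filter (fun p => (ctx.lookup p.1).isNone)).all (pvOk ti) = true
    · simp only [pvScanB_eq ti _ hnd1, if_pos h2]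
      simp only [PySem.Dict.size, List.filter_filter]
      apply Bool.coe_iff_coe.mp
      simp only [List.all_eq_true, beq_iff_eq, List.length_eq_zero_iff,
        List.filter_eq_nil_iff]
      have h1' := List.all_eq_true.mp h1
      have h2' := List.all_eq_true.mp h2
      constructor
      · intro h p hp hcond
        have := h p hp
        cases hc : ctx.lookup p.1 with
        | some w => simp [hc] at hcond
        | none =>
          cases ht : ti.lookup p.1 with
          | some w => simp [hc, ht] at hcond
          | none => simp [List.lookup_append, hc, ht] at this
      · intro h p hp
        cases hc : ctx.lookup p.1 with
        | some w =>
          have := h1' p hp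
          simp only [pvOk, hc] at this
          simp [List.lookup_append, hc]
          exact eq_of_beq this
        | none =>
          have hpf : p ∈ conds.filter (fun p => (ctx.lookup p.1).isNone) :=
            List.mem_filter.mpr ⟨hp, by simp [hc]⟩
          cases ht : ti.lookup p.1 with
          | some w =>
            have := h2' p hpf
            simp only [pvOk, ht] at this
            simp [List.lookup_append, hc, ht]
            exact eq_of_beq this
          | none =>
            exact absurd (by simp [ht, hc]) (h p hp)
    · simp only [pvScanB_eq ti _ hnd1, if_neg h2]
      have h2f : (conds.filter (fun p => (ctx.lookup p.1).isNone)).all (pvOk ti) = false := by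
        simpa using h2
      obtain ⟨p, hpf, hpok⟩ := List.all_eq_false.mp h2f
      obtain ⟨hp, hcnone⟩ := List.mem_filter.mp hpf
      refine List.all_eq_false.mpr ⟨p, hp, ?_⟩
      cases ht : ti.lookup p.1 with
      | some w =>
        have hc : ctx.lookup p.1 = none := by simpa using hcnone
        have hwne : ¬ (w == p.2) = true := by simpa [pvOk, ht] using hpok
        simp only [List.lookup_append, hc, Option.or, ht]
        simpa using hwne
      | none => simp [pvOk, ht] at hpok
  · simp only [pvScanB_eq ctx conds hpre, if_neg h1]
    have h1f : conds.all (pvOk ctx) = false := by simpa using h1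
    obtain ⟨p, hp, hpok⟩ := List.all_eq_false.mp h1f
    refine List.all_eq_false.mpr ⟨p, hp, ?_⟩
    cases hc : ctx.lookup p.1 with
    | some w =>
      have hwne : ¬ (w == p.2) = true := by simpa [pvOk, hc] using hpok
      simp only [List.lookup_append, hc, Option.or]
      simpa using hwne
    | none => simp [pvOk, hc] at hpok
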